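-- pv_equiv track=rewrite | github.com/0z4ck/zeta_zero | moves.py | gold
-- ===== SOURCE A (Python) =====
-- def gold(x, y, me=True):
--     if me:
--         move_list = [(x,y-1),(x-1,y-1),(x+1,y-1),(x-1,y),(x+1,y),(x,y+1)]
--         if x == 0:
--             for im in ((x-1,y-1),(x-1,y)):
--               try:
--                 move_list.remove(im)
--               except:
--                 pass
--         if x == 8:
--             for im in ((x+1,y-1),(x+1,y)):
--               try:
--                 move_list.remove(im)
--               except:
--                 pass
--         if y == 0:
--             for im in ((x,y-1),(x-1,y-1),(x+1,y-1)):
--               try: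
--                 move_list.remove(im)
--               except:
--                 pass
--         if y == 8:
--             for im in ((x,y+1),):
--               try:
--                 move_list.remove(im)
--               except:
--                 pass
--
--         return move_list
--     else:
--         move_list = [(x,y+1),(x-1,y),(x+1,y),(x-1,y+1),(x+1,y+1),(x,y-1)]
--         if x == 0:
--             for im in ((x-1,y),(x-1,y+1)):
--               try:
--                 move_list.remove(im)
--               except:
--                 pass
--         if x == 8:
--             for im in ((x+1,y),(x+1,y+1)):
--               try:
--                 move_list.remove(im)
--               except:
--                 pass
--         if y == 0:
--             for im in ((x,y-1),):
--               try:
--                 move_list.remove(im)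
--               except:
--                 pass
--         if y == 8:
--             for im in ((x,y+1),(x-1,y+1),(x+1,y+1)):
--               try:
--                 move_list.remove(im)
--               except:
--                 pass
--         return move_list
-- ===== SOURCE B (Python) =====
-- def gold(x, y, me=True):
--     if me:
--         offsets = [(0, -1), (-1, -1), (1, -1), (-1, 0), (1, 0), (0, 1)]
--     else:
--         offsets = [(0, 1), (-1, 0), (1, 0), (-1, 1), (1, 1), (0, -1)]
--
--     def allowed(dx, dy):
--         if x == 0 and dx == -1:
--             return False
--         if x == 8 and dx == 1:
--             return False
--         if y == 0 and dy == -1: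
--             return False
--         if y == 8 and dy == 1:
--             return False
--         return True
--
--     return [(x + dx, y + dy) for dx, dy in offsets if allowed(dx, dy)]
-- ===== Notes on version B (the rewrite author's own statement) =====
-- stated objective: alternative
-- what changed: B works in offset space: it keeps one list of relative (dx,dy) offsets per case, filters it with a clip predicate (dx=-1 blocked at x==0, dx=+1 at x==8, likewise for dy) and maps to absolute positions, replacing A's mutation of an absolute-coordinate list by repeated try/except list.remove scans.
import Mathlib
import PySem

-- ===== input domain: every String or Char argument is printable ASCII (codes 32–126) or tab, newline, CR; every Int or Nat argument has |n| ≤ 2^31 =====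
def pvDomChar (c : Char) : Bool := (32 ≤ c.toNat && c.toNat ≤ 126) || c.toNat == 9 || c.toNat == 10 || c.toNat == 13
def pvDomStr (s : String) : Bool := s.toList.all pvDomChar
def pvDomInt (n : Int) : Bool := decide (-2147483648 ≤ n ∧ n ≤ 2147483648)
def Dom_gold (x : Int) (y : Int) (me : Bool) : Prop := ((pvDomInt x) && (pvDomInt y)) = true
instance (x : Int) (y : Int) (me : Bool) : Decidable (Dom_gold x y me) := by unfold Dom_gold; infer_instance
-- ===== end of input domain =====

-- B computes the moves in offset space (filter relative (dx,dy) offsets by a clip predicate, then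
-- map to absolute positions) instead of A's try/except list.remove mutation (objective: alternative).

-- ===== PORT A =====
-- 'try: move_list.remove(im) except: pass' — remove? returns none on ValueError, list kept unchanged
def goldRemoveTry (xs : List (Int × Int)) (v : Int × Int) : List (Int × Int) :=
  match PySem.List.remove? xs v with
  | some r => r
  | none => xs

def gold (x : Int) (y : Int) (me : Bool) : List (Int × Int) :=
  if me then
    let moveList := [(x,y-1),(x-1,y-1),(x+1,y-1),(x-1,y),(x+1,y),(x,y+1)]
    let moveList := if x = 0 then [(x-1,y-1),(x-1,y)].foldl goldRemoveTry moveList else moveList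
    let moveList := if x = 8 then [(x+1,y-1),(x+1,y)].foldl goldRemoveTry moveList else moveList
    let moveList := if y = 0 then [(x,y-1),(x-1,y-1),(x+1,y-1)].foldl goldRemoveTry moveList else moveList
    let moveList := if y = 8 then [(x,y+1)].foldl goldRemoveTry moveList else moveList
    moveList
  else
    let moveList := [(x,y+1),(x-1,y),(x+1,y),(x-1,y+1),(x+1,y+1),(x,y-1)]
    let moveList := if x = 0 then [(x-1,y),(x-1,y+1)].foldl goldRemoveTry moveList else moveList
    let moveList := if x = 8 then [(x+1,y),(x+1,y+1)].foldl goldRemoveTry moveList else moveList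
    let moveList := if y = 0 then [(x,y-1)].foldl goldRemoveTry moveList else moveList
    let moveList := if y = 8 then [(x,y+1),(x-1,y+1),(x+1,y+1)].foldl goldRemoveTry moveList else moveList
    moveList

-- ===== PORT B =====
def goldAllowed (x y dx dy : Int) : Bool :=
  if x = 0 ∧ dx = -1 then false
  else if x = 8 ∧ dx = 1 then false
  else if y = 0 ∧ dy = -1 then false
  else if y = 8 ∧ dy = 1 then false
  else true

def gold_alt (x : Int) (y : Int) (me : Bool) : List (Int × Int) :=
  let offsets : List (Int × Int) :=
    if me then [(0,-1),(-1,-1),(1,-1),(-1,0),(1,0),(0,1)]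
    else [(0,1),(-1,0),(1,0),(-1,1),(1,1),(0,-1)]
  (offsets.filter (fun d => goldAllowed x y d.1 d.2)).map (fun d => (x + d.1, y + d.2))

-- ===== PRECONDITION & SPEC =====
def Spec_gold (x : Int) (y : Int) (me : Bool) (out : List (Int × Int)) : Prop := out = gold_alt x y me
instance (x : Int) (y : Int) (me : Bool) (out : List (Int × Int)) : Decidable (Spec_gold x y me out) := by unfold Spec_gold; infer_instance

-- ===== CLAIM =====
def Claim_equal_gold : Prop := ∀ (x : Int) (y : Int) (me : Bool), Dom_gold x y me → Spec_gold x y me (gold x y me)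

-- ===== LEMMAS AND PROOFS =====
lemma pvNe3 (x : Int) : x + 1 ≠ x - 1 := by omega
lemma pvNe4 (x : Int) : x - 1 ≠ x + 1 := by omega

-- ===== VERDICT =====
set_option maxRecDepth 8000 in
theorem gold_spec : Claim_equal_gold := by
  intro x y me _
  unfold Spec_gold gold gold_alt goldAllowed
  cases me <;>
    rcases eq_or_ne x 0 with hx0 | hx0 <;> rcases eq_or_ne x 8 with hx8 | hx8 <;>
    rcases eq_or_ne y 0 with hy0 | hy0 <;> rcases eq_or_ne y 8 with hy8 | hy8 <;>
    subst_vars <;> (try omega) <;>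
    simp [goldRemoveTry, PySem.List.remove?_cons_self, PySem.List.remove?_cons_of_ne,
      List.filter, Prod.ext_iff, pvNe3, pvNe4, *]
  all_goals first | omega | decide
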